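-- pv_equiv track=rewrite | github.com/abarnaavenkatesan97/Competetive-coding-problem-solving | minimumstepstoanagram.py | minimumfind
-- ===== SOURCE A (Python) =====
-- def minimumfind(s,t):
--     d = {}
--     o = {}
--     for i in s:
--         if i in d:
--             d[i] += 1
--         else:
--             d[i] = 1
--     for i in t:
--         if i in o:
--             o[i] += 1
--         else:
--             o[i] = 1
--     count = 0
--     for okeys in o:
--         found = False
--         for dkeys in d:
--             if dkeys == okeys:
--                 found = True
--                 break
--         if (found):
--             if o[okeys] <= d[dkeys]:
--                 pass
--             else:
--                 count = count + (o[okeys] - d[dkeys])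
--         else:
--             count += o[okeys]
--     return count
-- ===== SOURCE B (Python) =====
-- def minimumfind(s, t):
--     rem = {}
--     for c in s:
--         rem[c] = rem.get(c, 0) + 1
--     count = 0
--     for c in t:
--         if rem.get(c, 0) > 0:
--             rem[c] = rem.get(c, 0) - 1
--         else:
--             count = count + 1
--     return count
-- ===== Notes on version B (the rewrite author's own statement) =====
-- stated objective: alternative
-- what changed: B builds one frequency table from s only and makes a single consume-or-count pass over t, instead of building two counter dicts and comparing them with a nested key scan.
import Mathlib
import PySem

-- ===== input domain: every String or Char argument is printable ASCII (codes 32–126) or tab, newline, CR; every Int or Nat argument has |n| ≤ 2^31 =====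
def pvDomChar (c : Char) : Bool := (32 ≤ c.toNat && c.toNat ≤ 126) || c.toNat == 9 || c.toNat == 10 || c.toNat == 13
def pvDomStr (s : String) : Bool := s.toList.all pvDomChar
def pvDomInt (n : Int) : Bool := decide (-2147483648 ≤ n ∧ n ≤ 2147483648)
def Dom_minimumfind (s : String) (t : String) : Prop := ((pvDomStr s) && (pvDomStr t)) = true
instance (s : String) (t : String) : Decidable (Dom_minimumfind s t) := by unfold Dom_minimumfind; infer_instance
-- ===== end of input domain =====

-- B makes one consume-or-count pass over t against a single frequency table of s,
-- instead of A's two counter dicts compared by a nested key scan (objective: alternative).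

-- ===== PORT A =====
-- inner 'for dkeys in d: if dkeys == okeys: found = True; break' loop: first key equal to okeys
def pvFindKey (ks : List Char) (okeys : Char) : Option Char :=
  match ks with
  | [] => none
  | k :: rest => if k = okeys then some k else pvFindKey rest okeys

def minimumfind (s : String) (t : String) : Int :=
  let d := s.toList.foldl
    (fun d i => if d.contains i then d.modify i 0 (· + 1) else d.insert i 1) PySem.Dict.empty
  let o := t.toList.foldl
    (fun o i => if o.contains i then o.modify i 0 (· + 1) else o.insert i 1) PySem.Dict.empty
  o.keys.foldl (fun count okeys =>
    match pvFindKey d.keys okeys with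
    | some dkeys =>
        if o.getD okeys 0 ≤ d.getD dkeys 0 then count
        else count + (o.getD okeys 0 - d.getD dkeys 0)
    | none => count + o.getD okeys 0) 0

-- ===== PORT B =====
def minimumfind_alt (s : String) (t : String) : Int :=
  let rem := s.toList.foldl (fun d c => d.insert c (d.getD c 0 + 1)) PySem.Dict.empty
  (t.toList.foldl
    (fun (st : PySem.Dict Char Int × Int) c =>
      if st.1.getD c 0 > 0 then (st.1.insert c (st.1.getD c 0 - 1), st.2)
      else (st.1, st.2 + 1))
    (rem, 0)).2

-- ===== PRECONDITION & SPEC =====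
def Spec_minimumfind (s : String) (t : String) (out : Int) : Prop := out = minimumfind_alt s t
instance (s : String) (t : String) (out : Int) : Decidable (Spec_minimumfind s t out) := by unfold Spec_minimumfind; infer_instance

-- ===== CLAIM (what is proved, stated in full; the proofs are below) =====
def Claim_equal_minimumfind : Prop := ∀ (s : String) (t : String), Dom_minimumfind s t → Spec_minimumfind s t (minimumfind s t)

-- ===== LEMMAS AND PROOFS =====

-- B's loop, expressed over a plain count function (proof device only)
def pvGreedy (g : Char → Nat) : List Char → Nat
  | [] => 0
  | c :: l => if 0 < g c then pvGreedy (fun k => if k = c then g c - 1 else g k) l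
              else 1 + pvGreedy g l

theorem pvFindKey_eq (ks : List Char) (o : Char) :
    pvFindKey ks o = if o ∈ ks then some o else none := by
  induction ks with
  | nil => simp [pvFindKey]
  | cons k rest ih =>
      by_cases h : k = o
      · simp [pvFindKey, h]
      · simp [pvFindKey, h, ih, Ne.symm h]

theorem pvModify_missing (d : PySem.Dict Char Int) (i : Char) (h : d.contains i = false) :
    d.modify i 0 (· + 1) = d.insert i 1 := by
  simp [PySem.Dict.modify, PySem.Dict.getD_of_not_contains d 0 h]

theorem pvBuildA_eq (l : List Char) :
    l.foldl (fun d i => if d.contains i then d.modify i 0 (· + 1) else d.insert i 1)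
      PySem.Dict.empty = PySem.Dict.counter l := by
  have hb : (fun (d : PySem.Dict Char Int) i =>
      if d.contains i then d.modify i 0 (· + 1) else d.insert i 1)
      = fun d i => d.modify i 0 (· + 1) := by
    funext d i
    by_cases h : d.contains i
    · simp [h]
    · simp [h, pvModify_missing d i (by simpa using h)]
  rw [hb, PySem.Dict.counter_eq_foldl]

theorem pvSumIte (L : List Char) (c : Char) (hL : L.Nodup) (hc : c ∈ L) :
    (L.map (fun k => if k = c then 1 else 0)).sum = 1 := by
  induction L with
  | nil => simp at hc
  | cons a rest ih =>
      rcases List.nodup_cons.1 hL with ⟨ha, hrest⟩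
      rcases List.mem_cons.1 hc with h | h
      · subst h
        have hz : ∀ k ∈ rest, (if k = c then 1 else 0) = 0 := by
          intro k hk
          have hne : k ≠ c := fun e => ha (e ▸ hk)
          simp [hne]
        simp [List.map_congr_left hz]
      · have hac : a ≠ c := fun e => ha (e ▸ h)
        simp [hac, ih hrest h]

theorem pvGreedy_eq (L : List Char) (hL : L.Nodup) :
    ∀ (l : List Char) (g : Char → Nat), (∀ x ∈ l, x ∈ L) →
      pvGreedy g l = (L.map (fun k => l.count k - g k)).sum := by
  intro l
  induction l with
  | nil => intro g _; simp [pvGreedy]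
  | cons c l ih =>
      intro g hsub
      have hc : c ∈ L := hsub c (by simp)
      have hsub' : ∀ x ∈ l, x ∈ L := fun x hx => hsub x (by simp [hx])
      by_cases hg : 0 < g c
      · have hfun : (fun k => l.count k - (if k = c then g c - 1 else g k))
            = fun k => (c :: l).count k - g k := by
          funext k
          by_cases hk : k = c
          · subst hk; simp; omega
          · simp [Ne.symm hk, hk]
        rw [pvGreedy, if_pos hg, ih _ hsub', hfun]
      · have hg0 : g c = 0 := by omega
        have hfun : (fun k => (c :: l).count k - g k)
            = fun k => (l.count k - g k) + (if k = c then 1 else 0) := by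
          funext k
          by_cases hk : k = c
          · subst hk; simp [hg0]
          · simp [Ne.symm hk, hk]
        rw [pvGreedy, if_neg hg, ih _ hsub', hfun]
        have : (L.map (fun k => (l.count k - g k) + (if k = c then 1 else 0))).sum
            = (L.map (fun k => l.count k - g k)).sum
              + (L.map (fun k => if k = c then 1 else 0)).sum := by
          induction L with
          | nil => simp
          | cons a L ihL => simp; omega
        rw [this, pvSumIte L c hL hc]
        omega

theorem pvBLoop (l : List Char) :
    ∀ (d : PySem.Dict Char Int) (acc : Int), (∀ k, 0 ≤ d.getD k 0) →
      (l.foldl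
        (fun (st : PySem.Dict Char Int × Int) c =>
          if st.1.getD c 0 > 0 then (st.1.insert c (st.1.getD c 0 - 1), st.2)
          else (st.1, st.2 + 1)) (d, acc)).2
      = acc + (pvGreedy (fun c => (d.getD c 0).toNat) l : Int) := by
  induction l with
  | nil => intro d acc _; simp [pvGreedy]
  | cons c l ih =>
      intro d acc hpos
      by_cases h : d.getD c 0 > 0
      · have hnn : ∀ k, 0 ≤ (d.insert c (d.getD c 0 - 1)).getD k 0 := by
          intro k
          rw [PySem.Dict.getD_insert]
          split
          · omega
          · exact hpos k
        have hfun : (fun k => ((d.insert c (d.getD c 0 - 1)).getD k 0).toNat)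
            = fun k => if k = c then (d.getD c 0).toNat - 1 else (d.getD k 0).toNat := by
          funext k
          rw [PySem.Dict.getD_insert]
          split <;> omega
        simp only [List.foldl_cons, if_pos h]
        rw [ih _ acc hnn, hfun, pvGreedy, if_pos (by omega)]
      · have hz : (d.getD c 0).toNat = 0 := by have := hpos c; omega
        simp only [List.foldl_cons, if_neg h]
        rw [ih d (acc + 1) hpos, pvGreedy, if_neg (by omega)]
        omega

theorem pvFoldlAddTerm (f : Char → Int) (K : List Char) :
    ∀ (a : Int), K.foldl (fun a k => a + f k) a = a + (K.map f).sum := by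
  induction K with
  | nil => intro a; simp
  | cons k K ih => intro a; simp [ih]; ring

theorem pvCastSum (K : List Char) (f : Char → Nat) :
    (K.map (fun k => ((f k : Nat) : Int))).sum = ((K.map f).sum : Int) := by
  induction K with
  | nil => simp
  | cons k K ih => simp [ih]

-- ===== VERDICT (by name: the statement is the Claim_ definition above) =====
theorem minimumfind_spec : Claim_equal_minimumfind := by
  intro s t _
  unfold Spec_minimumfind
  set cs := s.toList with hcs
  set ct := t.toList with hct
  -- A side
  have hA : minimumfind s t
      = ((PySem.Set.ofList ct).map (fun k =>
          match pvFindKey (PySem.Set.ofList cs) k with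
          | some dk =>
              if ((ct.count k : Int)) ≤ ((PySem.Dict.counter cs).getD dk 0)
              then 0
              else (ct.count k : Int) - (PySem.Dict.counter cs).getD dk 0
          | none => (ct.count k : Int))).sum := by
    simp only [minimumfind]
    rw [← hcs, ← hct]
    simp only [pvBuildA_eq, PySem.Dict.keys_counter]
    have hb : (fun (count : Int) okeys =>
        match pvFindKey (PySem.Set.ofList cs) okeys with
        | some dkeys =>
            if (PySem.Dict.counter ct).getD okeys 0 ≤ (PySem.Dict.counter cs).getD dkeys 0
            then count
            else count + ((PySem.Dict.counter ct).getD okeys 0 - (PySem.Dict.counter cs).getD dkeys 0)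
        | none => count + (PySem.Dict.counter ct).getD okeys 0)
        = fun count okeys => count +
          (match pvFindKey (PySem.Set.ofList cs) okeys with
          | some dk =>
              if ((ct.count okeys : Int)) ≤ ((PySem.Dict.counter cs).getD dk 0)
              then 0
              else (ct.count okeys : Int) - (PySem.Dict.counter cs).getD dk 0
          | none => (ct.count okeys : Int)) := by
      funext count okeys
      rw [PySem.Dict.getD_counter]
      cases pvFindKey (PySem.Set.ofList cs) okeys with
      | none => rfl
      | some dk => split <;> (try split_ifs) <;> ring
    rw [hb, pvFoldlAddTerm]
    simp
  -- per-key value of A's term, for keys of t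
  have hterm : ∀ k ∈ PySem.Set.ofList ct,
      (match pvFindKey (PySem.Set.ofList cs) k with
        | some dk =>
            if ((ct.count k : Int)) ≤ ((PySem.Dict.counter cs).getD dk 0)
            then 0
            else (ct.count k : Int) - (PySem.Dict.counter cs).getD dk 0
        | none => (ct.count k : Int))
      = ((ct.count k - cs.count k : Nat) : Int) := by
    intro k _
    rw [pvFindKey_eq]
    by_cases hk : k ∈ PySem.Set.ofList cs
    · rw [if_pos hk]
      simp only [PySem.Dict.getD_counter]
      by_cases hle : ((ct.count k : Int)) ≤ (cs.count k : Int)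
      · rw [if_pos hle]
        have h0 : ct.count k - cs.count k = 0 := by omega
        rw [h0]
        simp
      · rw [if_neg hle]
        have hle' : cs.count k ≤ ct.count k := by omega
        rw [Nat.cast_sub hle']
    · rw [if_neg hk]
      have : cs.count k = 0 := by
        rw [List.count_eq_zero]
        simpa [PySem.Set.mem_ofList] using hk
      simp [this]
  -- B side
  have hgB : (fun c => (((cs.foldl (fun (d : PySem.Dict Char Int) c => d.insert c (d.getD c 0 + 1))
        PySem.Dict.empty).getD c 0)).toNat) = fun c => cs.count c := by
    funext c
    rw [PySem.Dict.getD_foldl_insert_add_one, PySem.Dict.getD_empty]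
    omega
  have hB : minimumfind_alt s t = (pvGreedy (fun c => cs.count c) ct : Int) := by
    simp only [minimumfind_alt]
    rw [← hcs, ← hct]
    rw [pvBLoop ct _ 0 (by
      intro k
      rw [PySem.Dict.getD_foldl_insert_add_one, PySem.Dict.getD_empty]
      omega), hgB]
    ring
  rw [hA, hB, List.map_congr_left hterm, pvCastSum,
    pvGreedy_eq (PySem.Set.ofList ct) (PySem.Set.nodup_ofList ct) ct (fun c => cs.count c)
      (by intro x hx; simpa [PySem.Set.mem_ofList] using hx)]
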